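-- pv_equiv track=rewrite | github.com/levhyun/PythonDatabaseWorkbench | Server/Service.py | CommandDecomposition1
-- ===== SOURCE A (Python) =====
-- def CommandDecomposition1(command):
--     result = ""
--     for i in command:
--         if i != '[' and i != ']':
--             result += i
--         if i == ']':
--             break
--     return result
-- ===== SOURCE B (Python) =====
-- def CommandDecomposition1(command):
--     idx = command.find(']')
--     head = command if idx == -1 else command[:idx]
--     return head.replace('[', '')
-- ===== Notes on version B (the rewrite author's own statement) =====
-- stated objective: faster
-- what changed: Replaces the char-by-char accumulation loop with break by locating the first ']' with str.find, slicing up to it, and stripping '[' with str.replace (C-level scans instead of a Python-level loop).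
import Mathlib
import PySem

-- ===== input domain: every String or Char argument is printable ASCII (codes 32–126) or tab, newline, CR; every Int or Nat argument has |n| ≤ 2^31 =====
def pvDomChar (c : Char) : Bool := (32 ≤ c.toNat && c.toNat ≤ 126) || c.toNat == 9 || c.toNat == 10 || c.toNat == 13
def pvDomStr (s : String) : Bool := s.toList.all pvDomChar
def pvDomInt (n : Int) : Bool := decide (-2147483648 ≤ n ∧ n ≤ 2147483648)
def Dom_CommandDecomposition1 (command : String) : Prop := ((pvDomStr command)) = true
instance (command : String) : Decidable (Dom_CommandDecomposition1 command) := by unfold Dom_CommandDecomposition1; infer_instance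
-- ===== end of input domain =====

-- B replaces A's char-by-char copy loop (with break at ']') by find-the-first-']', slice, and a '['-stripping replace.


-- ===== PORT A =====
-- 'result' is carried as a List Char (Python's string grown by +=); the loop with 'break' is this recursion.
def goA_CommandDecomposition1 (acc : List Char) : List Char → List Char
  | [] => acc
  | c :: rest =>
    let acc' := if c ≠ '[' ∧ c ≠ ']' then acc ++ [c] else acc
    if c = ']' then acc' else goA_CommandDecomposition1 acc' rest

def CommandDecomposition1 (command : String) : String :=
  String.ofList (goA_CommandDecomposition1 [] command.toList)

-- ===== PORT B =====
def CommandDecomposition1_alt (command : String) : String :=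
  let idx := PySem.Str.find command "]"
  let head := if idx = -1 then command else PySem.Str.slice command none (some idx)
  PySem.Str.replace head "[" ""

-- ===== PRECONDITION & SPEC =====
def Spec_CommandDecomposition1 (command : String) (out : String) : Prop := out = CommandDecomposition1_alt command
instance (command : String) (out : String) : Decidable (Spec_CommandDecomposition1 command out) := by unfold Spec_CommandDecomposition1; infer_instance

-- ===== CLAIM (what is proved, stated in full; the proofs are below) =====
def Claim_equal_CommandDecomposition1 : Prop := ∀ (command : String), Dom_CommandDecomposition1 command → Spec_CommandDecomposition1 command (CommandDecomposition1 command)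

-- ===== LEMMAS AND PROOFS =====

-- Chars.replace with old = "[" and new = "" is filtering '[' out.
theorem go_replace_filter (rem acc : List Char) (fuel : Nat) (h : rem.length ≤ fuel) :
    PySem.Chars.replace.go ['['] [] fuel rem acc = acc.reverse ++ rem.filter (· ≠ '[') := by
  induction rem generalizing acc fuel with
  | nil =>
    cases fuel <;> simp [PySem.Chars.replace.go]
  | cons c t ih =>
    cases fuel with
    | zero => simp at h
    | succ f =>
      simp only [List.length_cons, Nat.add_one_le_iff, Nat.lt_succ_iff] at h
      unfold PySem.Chars.replace.go
      by_cases hc : c = '['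
      · subst hc
        simp [List.isPrefixOf, ih _ _ h]
      · have hpre : List.isPrefixOf ['['] (c :: t) = false := by
          simp [List.isPrefixOf]; exact fun h' => (hc h'.symm).elim
        simp [hpre, ih _ _ h, hc]

theorem replace_filter (l : List Char) :
    PySem.Chars.replace l ['['] [] = l.filter (· ≠ '[') := by
  unfold PySem.Chars.replace
  simp [go_replace_filter l [] l.length (le_refl _)]

-- A's loop computes filter (≠ '[') of takeWhile (≠ ']').
theorem goA_characterize (l acc : List Char) :
    goA_CommandDecomposition1 acc l = acc ++ (l.takeWhile (· ≠ ']')).filter (· ≠ '[') := by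
  induction l generalizing acc with
  | nil => simp [goA_CommandDecomposition1]
  | cons c t ih =>
    by_cases hc : c = ']'
    · subst hc
      simp [goA_CommandDecomposition1]
    · by_cases hb : c = '['
      · subst hb
        simp [goA_CommandDecomposition1, ih]
      · simp [goA_CommandDecomposition1, hc, hb, ih]

-- first-occurrence index turns take into takeWhile
theorem take_eq_takeWhile (l : List Char) (n : Nat)
    (hmem : [']'] <+: l.drop n) (hmin : ∀ i < n, ¬ [']'] <+: l.drop i) :
    l.take n = l.takeWhile (· ≠ ']') := by
  induction l generalizing n with
  | nil => simp
  | cons c t ih =>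
    cases n with
    | zero =>
      simp only [List.drop_zero] at hmem
      obtain ⟨t', ht⟩ := hmem
      cases ht
      simp
    | succ m =>
      have hc : c ≠ ']' := by
        intro h; subst h
        exact hmin 0 (Nat.succ_pos m) ⟨t, by simp⟩
      simp only [List.take_succ_cons, List.takeWhile_cons, hc, decide_true,
        if_pos, ne_eq, not_false_eq_true]
      rw [ih m hmem (fun i hi => hmin (i+1) (by omega))]

theorem takeWhile_eq_self_of_not_mem (l : List Char) (h : ∀ j, ¬ [']'] <+: l.drop j) :
    l.takeWhile (· ≠ ']') = l := by
  induction l with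
  | nil => rfl
  | cons c t ih =>
    have hc : c ≠ ']' := by
      intro he; subst he; exact h 0 ⟨t, by simp⟩
    simp only [List.takeWhile_cons, hc, decide_true, ne_eq, not_false_eq_true]
    rw [ih (fun j => h (j+1))]
    simp

-- ===== VERDICT (by name: the statement is the Claim_ definition above) =====
theorem CommandDecomposition1_spec : Claim_equal_CommandDecomposition1 := by
  intro command _
  unfold Spec_CommandDecomposition1 CommandDecomposition1 CommandDecomposition1_alt
  have hfind : PySem.Str.find command "]" = PySem.Chars.find command.toList [']'] := by
    simp [PySem.Str.find]
  by_cases h : PySem.Chars.find command.toList [']'] = -1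
  · -- no ']' in command: the loop runs to the end, B keeps the whole string
    have hnot : ¬ [']'] <:+: command.toList := (PySem.Chars.find_eq_neg_one_iff _ _).mp h
    have hnone : ∀ j, ¬ [']'] <+: command.toList.drop j := by
      intro j hj
      exact hnot (List.infix_iff_prefix_suffix.mpr ⟨_, hj, List.drop_suffix _ _⟩)
    simp only [hfind, h, if_true]
    apply String.ext
    rw [goA_characterize, takeWhile_eq_self_of_not_mem _ hnone]
    simp only [List.nil_append, PySem.Str.toList_replace]
    rw [show ("[" : String).toList = ['['] from rfl, show ("" : String).toList = [] from rfl,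
        replace_filter]
    simp
  · -- ']' occurs; find points at its first index
    have hnn : 0 ≤ PySem.Chars.find command.toList [']'] := by
      rcases (PySem.Chars.neg_one_le_find command.toList [']']).lt_or_eq with hlt | heq
      · omega
      · exact absurd heq.symm h
    obtain ⟨hpre, hmin⟩ := PySem.Chars.find_spec (s := command.toList) (sub := [']']) hnn
    have hslice : (PySem.Str.slice command none (some (PySem.Chars.find command.toList [']']))).toList
        = command.toList.take (PySem.Chars.find command.toList [']']).toNat := by
      simp only [PySem.Str.slice, PySem.Chars.slice_eq_listSlice]
      rw [PySem.List.slice_to _ (hb := hnn)]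
      simp
    simp only [hfind, if_neg h]
    apply String.ext
    rw [goA_characterize]
    simp only [List.nil_append, PySem.Str.toList_replace]
    rw [show ("[" : String).toList = ['['] from rfl, show ("" : String).toList = [] from rfl,
        replace_filter, hslice,
        take_eq_takeWhile _ _ hpre hmin]
    simp
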